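-- pv_equiv track=rewrite | github.com/myr0nl/EvacuationHub | backend/services/confidence_scorer.py | _calculate_nearby_stats
-- ===== SOURCE A (Python) =====
-- from typing import Dict, List, Optional
--
-- def _calculate_nearby_stats(report: Dict, nearby_reports: List[Dict]) -> Dict:
--     """Calculate statistics about nearby reports for AI context"""
--     if not nearby_reports:
--         return {
--             'user_reports_count': 0,
--             'official_reports_count': 0,
--             'total_count': 0
--         }
--
--     report_type = report.get('type') or report.get('disaster_type')
--     user_count = 0
--     official_count = 0
--
--     for nearby in nearby_reports:
--         nearby_type = nearby.get('type') or nearby.get('disaster_type')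
--         nearby_source = nearby.get('source', 'unknown')
--
--         # Only count same disaster type
--         if nearby_type != report_type:
--             continue
--
--         # Skip self
--         if report.get('id') and nearby.get('id') and report['id'] == nearby['id']:
--             continue
--
--         if nearby_source in ['nasa_firms', 'noaa', 'usgs']:
--             official_count += 1
--         elif nearby_source in ['user_report', 'user_report_authenticated']:
--             user_count += 1
--
--     return {
--         'user_reports_count': user_count,
--         'official_reports_count': official_count,
--         'total_count': user_count + official_count
--     }
-- ===== SOURCE B (Python) =====
-- def _calculate_nearby_stats(report, nearby_reports):
--     """Build a source-frequency map of matching nearby reports, then read the buckets off it."""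
--     report_type = report.get('type') or report.get('disaster_type')
--     report_id = report.get('id')
--     sources = [
--         n.get('source', 'unknown')
--         for n in nearby_reports
--         if (n.get('type') or n.get('disaster_type')) == report_type
--         and not (report_id and n.get('id') and report_id == n['id'])
--     ]
--     counts = {}
--     for s in sources:
--         counts[s] = counts.get(s, 0) + 1
--     user_count = counts.get('user_report', 0) + counts.get('user_report_authenticated', 0)
--     official_count = counts.get('nasa_firms', 0) + counts.get('noaa', 0) + counts.get('usgs', 0)
--     return {
--         'user_reports_count': user_count,
--         'official_reports_count': official_count,
--         'total_count': user_count + official_count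
--     }
-- ===== Notes on version B (the rewrite author's own statement) =====
-- stated objective: alternative
-- what changed: A's single loop with interleaved if/elif bucket counters is replaced by building a source-frequency dictionary (counter) over matching nearby reports and then reading the five recognized source keys out of it; the per-element classification branches disappear.
import Mathlib
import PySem

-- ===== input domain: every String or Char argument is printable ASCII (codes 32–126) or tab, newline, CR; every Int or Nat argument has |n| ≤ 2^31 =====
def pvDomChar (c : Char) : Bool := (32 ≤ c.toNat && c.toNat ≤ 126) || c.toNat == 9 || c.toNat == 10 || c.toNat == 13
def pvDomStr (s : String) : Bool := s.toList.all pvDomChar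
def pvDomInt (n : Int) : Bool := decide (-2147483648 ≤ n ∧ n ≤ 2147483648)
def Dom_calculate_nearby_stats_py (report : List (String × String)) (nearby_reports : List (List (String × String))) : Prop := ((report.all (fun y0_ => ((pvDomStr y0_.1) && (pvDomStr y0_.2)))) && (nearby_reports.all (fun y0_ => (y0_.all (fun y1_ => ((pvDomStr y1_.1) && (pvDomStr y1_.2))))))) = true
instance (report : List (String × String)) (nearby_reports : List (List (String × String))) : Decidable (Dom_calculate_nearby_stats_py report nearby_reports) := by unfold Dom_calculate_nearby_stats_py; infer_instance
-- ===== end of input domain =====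

-- B replaces A's interleaved if/elif counting loop by a source-frequency dictionary over
-- matching nearby reports, reading the five recognized bucket keys from it (objective: alternative).

-- ===== PORT A =====
-- dict.get(k) ported as first-match lookup in the association list (exact)
def pvGet? (d : List (String × String)) (k : String) : Option String :=
  (d.find? (fun p => p.1 == k)).map (·.2)

-- d.get('type') or d.get('disaster_type')  (Python truthiness: None and "" are falsy; exact)
def pvEffType (d : List (String × String)) : Option String :=
  match pvGet? d "type" with
  | some v => if v = "" then pvGet? d "disaster_type" else some v
  | none => pvGet? d "disaster_type"

-- report.get('id') and nearby.get('id') and report['id'] == nearby['id']  (as a Bool; exact)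
def pvIsSelf (report nearby : List (String × String)) : Bool :=
  match pvGet? report "id", pvGet? nearby "id" with
  | some r, some n => r ≠ "" && n ≠ "" && r == n
  | _, _ => false

-- the body of A's for-loop, on the (user_count, official_count) state
def pvStepA (report : List (String × String)) (report_type : Option String)
    (acc : Int × Int) (nearby : List (String × String)) : Int × Int :=
  let nearby_type := pvEffType nearby
  let nearby_source := (pvGet? nearby "source").getD "unknown"
  if nearby_type ≠ report_type then acc
  else if pvIsSelf report nearby = true then acc
  else if nearby_source = "nasa_firms" ∨ nearby_source = "noaa" ∨ nearby_source = "usgs" then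
    (acc.1, acc.2 + 1)
  else if nearby_source = "user_report" ∨ nearby_source = "user_report_authenticated" then
    (acc.1 + 1, acc.2)
  else acc

def calculate_nearby_stats_py (report : List (String × String)) (nearby_reports : List (List (String × String))) : List (String × Int) :=
  if nearby_reports = [] then
    [("user_reports_count", 0), ("official_reports_count", 0), ("total_count", 0)]
  else
    let report_type := pvEffType report
    let p : Int × Int := nearby_reports.foldl (pvStepA report report_type) (0, 0)
    [("user_reports_count", p.1), ("official_reports_count", p.2), ("total_count", p.1 + p.2)]

-- ===== PORT B =====
def pvSrc (n : List (String × String)) : String := (pvGet? n "source").getD "unknown"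

def pvMatch (report : List (String × String)) (rt : Option String) (n : List (String × String)) : Bool :=
  pvEffType n == rt && !(pvIsSelf report n)

def calculate_nearby_stats_py_alt (report : List (String × String)) (nearby_reports : List (List (String × String))) : List (String × Int) :=
  let rt := pvEffType report
  let sources := (nearby_reports.filter (pvMatch report rt)).map pvSrc
  let counts : PySem.Dict String Int :=
    sources.foldl (fun d s => d.insert s (d.getD s 0 + 1)) PySem.Dict.empty
  let user_count := counts.getD "user_report" 0 + counts.getD "user_report_authenticated" 0
  let official_count := counts.getD "nasa_firms" 0 + counts.getD "noaa" 0 + counts.getD "usgs" 0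
  [("user_reports_count", user_count), ("official_reports_count", official_count),
   ("total_count", user_count + official_count)]

-- ===== PRECONDITION & SPEC =====
def Spec_calculate_nearby_stats_py (report : List (String × String)) (nearby_reports : List (List (String × String))) (out : List (String × Int)) : Prop := out = calculate_nearby_stats_py_alt report nearby_reports
instance (report : List (String × String)) (nearby_reports : List (List (String × String))) (out : List (String × Int)) : Decidable (Spec_calculate_nearby_stats_py report nearby_reports out) := by unfold Spec_calculate_nearby_stats_py; infer_instance

-- ===== CLAIM =====
def Claim_equal_calculate_nearby_stats_py : Prop := ∀ (report : List (String × String)) (nearby_reports : List (List (String × String))), Dom_calculate_nearby_stats_py report nearby_reports → Spec_calculate_nearby_stats_py report nearby_reports (calculate_nearby_stats_py report nearby_reports)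

-- ===== LEMMAS AND PROOFS =====
-- number of matching reports with source k, as drawn from sources list
def pvCnt (report : List (String × String)) (rt : Option String)
    (l : List (List (String × String))) (k : String) : Int :=
  (((l.filter (pvMatch report rt)).map pvSrc).count k : Int)

theorem foldl_eq_counts (report : List (String × String)) (rt : Option String)
    (l : List (List (String × String))) (u o : Int) :
    l.foldl (pvStepA report rt) (u, o)
    = (u + pvCnt report rt l "user_report" + pvCnt report rt l "user_report_authenticated",
       o + pvCnt report rt l "nasa_firms" + pvCnt report rt l "noaa" + pvCnt report rt l "usgs") := by
  induction l generalizing u o with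
  | nil => simp [pvCnt]
  | cons hd tl ih =>
    have hcnt : ∀ k, pvCnt report rt (hd :: tl) k
        = (if pvMatch report rt hd then (if pvSrc hd = k then 1 else 0) else 0) + pvCnt report rt tl k := by
      intro k
      unfold pvCnt
      by_cases hm : pvMatch report rt hd
      · simp [hm, List.count_cons]
        by_cases hk : pvSrc hd = k <;> simp [hk] <;> omega
      · simp [List.filter_cons, hm]
    have hsrc : (pvGet? hd "source").getD "unknown" = pvSrc hd := rfl
    simp only [List.foldl_cons]
    by_cases hm : pvMatch report rt hd
    · have hm' := hm
      unfold pvMatch at hm'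
      obtain ⟨h1, h2⟩ := Bool.and_eq_true_iff.mp hm'
      have hteq : pvEffType hd = rt := eq_of_beq h1
      have hself : pvIsSelf report hd = false := by simpa using h2
      by_cases hoff : pvSrc hd = "nasa_firms" ∨ pvSrc hd = "noaa" ∨ pvSrc hd = "usgs"
      · rw [show pvStepA report rt (u, o) hd = (u, o + 1) by
          unfold pvStepA; rw [hsrc, if_neg (by simp [hteq]), if_neg (by simp [hself]), if_pos hoff]]
        rw [ih]
        simp only [hcnt, hm, if_true]
        rcases hoff with h | h | h <;> rw [h] <;> simp <;> omega
      · by_cases huser : pvSrc hd = "user_report" ∨ pvSrc hd = "user_report_authenticated"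
        · rw [show pvStepA report rt (u, o) hd = (u + 1, o) by
            unfold pvStepA; rw [hsrc, if_neg (by simp [hteq]), if_neg (by simp [hself]), if_neg hoff, if_pos huser]]
          rw [ih]
          simp only [hcnt, hm, if_true]
          rcases huser with h | h <;> rw [h] <;> simp <;> omega
        · rw [show pvStepA report rt (u, o) hd = (u, o) by
            unfold pvStepA; rw [hsrc, if_neg (by simp [hteq]), if_neg (by simp [hself]), if_neg hoff, if_neg huser]]
          rw [ih]
          push_neg at hoff huser
          simp only [hcnt, hm, if_true]
          simp [hoff.1, hoff.2.1, hoff.2.2, huser.1, huser.2]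
    · rw [show pvStepA report rt (u, o) hd = (u, o) by
        unfold pvStepA
        by_cases ht : pvEffType hd = rt
        · have hmf : pvMatch report rt hd = false := by simpa using hm
          unfold pvMatch at hmf
          simp only [ht, beq_self_eq_true, Bool.true_and, Bool.not_eq_false'] at hmf
          rw [if_neg (by simp [ht]), if_pos hmf]
        · rw [if_pos (by simp [ht])]]
      rw [ih]
      simp only [hcnt, hm, if_false]
      simp

theorem getD_counts (report : List (String × String)) (rt : Option String)
    (l : List (List (String × String))) (k : String) :
    (((l.filter (pvMatch report rt)).map pvSrc).foldl
        (fun d s => d.insert s (d.getD s 0 + 1)) (PySem.Dict.empty : PySem.Dict String Int)).getD k 0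
    = pvCnt report rt l k := by
  rw [PySem.Dict.getD_foldl_insert_add_one]
  simp [pvCnt]

-- ===== VERDICT =====
theorem calculate_nearby_stats_py_spec : Claim_equal_calculate_nearby_stats_py := by
  intro report nearby_reports _
  unfold Spec_calculate_nearby_stats_py calculate_nearby_stats_py calculate_nearby_stats_py_alt
  cases nearby_reports with
  | nil => simp [pvMatch, PySem.Dict.getD_empty]
  | cons hd tl =>
    simp only [if_neg (List.cons_ne_nil hd tl)]
    rw [foldl_eq_counts report (pvEffType report) (hd :: tl) 0 0]
    simp only [getD_counts]
    simp only [List.cons.injEq, Prod.mk.injEq, and_true, true_and]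
    constructor
    · omega
    constructor
    · omega
    · omega
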